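-- pv_equiv track=rewrite | github.com/Canbomm/Disciplina-APC | Monitoria/Questionário Listas Heterogêneas/Questao 01/onepiece.py | verificadiagonais
-- ===== SOURCE A (Python) =====
-- def verificadiagonais(matriz):
--     # pegando os indices das diagonais
--     posincial = 0
--     posfinal = len(matriz[0])-1
--
--     # percorrendo a matriz
--     for linha in matriz:
--         index = 0
--         for coluna in linha:
--             # se o caractere em questao faz parte de uma diagonal
--             if index == posincial or index == posfinal:
--                 if coluna != "X":
--                     return False
--             # se nao faz parte, ele nao pode ser X
--             elif coluna == "X":
--                 return False
--             index += 1
--         # atualizando os "indices das diagonais"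
--         posincial += 1
--         posfinal -= 1
--     # caso percorra tudo sem dar false, e poneglifo
--     return True
-- ===== SOURCE B (Python) =====
-- def verificadiagonais(matriz):
--     m = len(matriz[0])
--     xs = {(i, j) for i, linha in enumerate(matriz) for j, c in enumerate(linha) if c == "X"}
--     diag = {(i, j) for i, linha in enumerate(matriz)
--             for j in {i, m - 1 - i} if 0 <= j < len(linha)}
--     return xs == diag
-- ===== Notes on version B (the rewrite author's own statement) =====
-- stated objective: alternative
-- what changed: Replaces A's single early-exit scan with sliding diagonal counters by building the set of 'X' cell coordinates and the set of expected in-range diagonal coordinates and comparing the two sets for equality.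
import Mathlib
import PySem

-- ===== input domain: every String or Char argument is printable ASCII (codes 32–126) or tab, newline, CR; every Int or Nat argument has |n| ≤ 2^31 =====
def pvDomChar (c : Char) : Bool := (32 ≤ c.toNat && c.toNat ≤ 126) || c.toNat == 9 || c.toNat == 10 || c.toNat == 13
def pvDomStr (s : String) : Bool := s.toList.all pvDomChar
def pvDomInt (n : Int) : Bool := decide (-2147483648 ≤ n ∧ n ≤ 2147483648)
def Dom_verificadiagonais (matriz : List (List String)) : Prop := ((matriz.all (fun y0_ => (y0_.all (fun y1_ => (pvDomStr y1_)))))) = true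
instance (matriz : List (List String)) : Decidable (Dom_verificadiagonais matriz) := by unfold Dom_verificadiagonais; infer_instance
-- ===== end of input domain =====

-- B replaces A's early-exit scan with sliding counters by building two position sets
-- (the 'X' cells and the expected diagonal cells) and comparing them (objective: alternative).


-- ===== PORT A =====
-- inner 'for coluna in linha' loop of A (index runs from `index`; early `return False` = false)
def pvRowA (posi posf index : Int) : List String → Bool
  | [] => true
  | coluna :: rest =>
    if index = posi ∨ index = posf then
      if coluna ≠ "X" then false else pvRowA posi posf (index + 1) rest
    else if coluna = "X" then false
    else pvRowA posi posf (index + 1) rest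

-- outer 'for linha in matriz' loop of A
def pvMatA (posi posf : Int) : List (List String) → Bool
  | [] => true
  | linha :: rest =>
    if pvRowA posi posf 0 linha then pvMatA (posi + 1) (posf - 1) rest else false

def verificadiagonais (matriz : List (List String)) : Bool :=
  match matriz with
  | [] => false  -- Python: len(matriz[0]) raises IndexError here; excluded by Pre_
  | r0 :: _ => pvMatA 0 ((r0.length : Int) - 1) matriz

-- ===== PORT B =====
def verificadiagonais_alt (matriz : List (List String)) : Bool :=
  match matriz with
  | [] => false  -- Python: len(matriz[0]) raises IndexError here; excluded by Pre_
  | r0 :: _ =>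
    let m : Int := r0.length
    let xs : PySem.Set (Int × Int) := PySem.Set.ofList
      ((PySem.List.enumerate matriz 0).flatMap (fun p =>
        (PySem.List.enumerate p.2 0).filterMap (fun q =>
          if q.2 = "X" then some (p.1, q.1) else none)))
    let diag : PySem.Set (Int × Int) := PySem.Set.ofList
      ((PySem.List.enumerate matriz 0).flatMap (fun p =>
        ((PySem.Set.ofList [p.1, m - 1 - p.1]).filter
            (fun j => decide (0 ≤ j) && decide (j < (p.2.length : Int)))).map
          (fun j => (p.1, j))))
    PySem.Set.equal xs diag

-- ===== PRECONDITION & SPEC =====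
-- Pre_ excludes only the empty matrix, on which both Pythons raise IndexError (len(matriz[0])).
def Pre_verificadiagonais (matriz : List (List String)) : Prop := matriz ≠ []
instance (matriz : List (List String)) : Decidable (Pre_verificadiagonais matriz) := by unfold Pre_verificadiagonais; infer_instance
def pvWitness_verificadiagonais : List (List String) := [["X"]]

def Spec_verificadiagonais (matriz : List (List String)) (out : Bool) : Prop := out = verificadiagonais_alt matriz
instance (matriz : List (List String)) (out : Bool) : Decidable (Spec_verificadiagonais matriz out) := by unfold Spec_verificadiagonais; infer_instance

-- ===== CLAIM (what is proved, stated in full; the proofs are below) =====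
def Claim_equal_verificadiagonais : Prop := ∀ (matriz : List (List String)), Dom_verificadiagonais matriz → Pre_verificadiagonais matriz → Spec_verificadiagonais matriz (verificadiagonais matriz)

-- ===== LEMMAS AND PROOFS =====

-- pointwise meaning of A's inner loop
def RowP (posi posf index : Int) (row : List String) : Prop :=
  ∀ j : Nat, (h : j < row.length) → (row[j] = "X" ↔ (index + j = posi ∨ index + j = posf))

theorem RowP_nil (posi posf index : Int) : RowP posi posf index [] := by
  intro j h; simp at h

theorem RowP_cons (posi posf index : Int) (c : String) (rest : List String) :
    RowP posi posf index (c :: rest) ↔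
      ((c = "X" ↔ (index = posi ∨ index = posf)) ∧ RowP posi posf (index + 1) rest) := by
  constructor
  · intro hp
    refine ⟨by simpa using hp 0 (by simp), ?_⟩
    intro j h
    have := hp (j + 1) (by simpa using Nat.succ_lt_succ h)
    simpa [Int.add_comm, Int.add_assoc, Int.add_left_comm, add_assoc] using this
  · rintro ⟨h0, hr⟩ j h
    cases j with
    | zero => simpa using h0
    | succ j =>
      have := hr j (by simpa using Nat.lt_of_succ_lt_succ h)
      simpa [Int.add_comm, Int.add_assoc, Int.add_left_comm, add_assoc] using this

theorem pvRowA_iff (row : List String) : ∀ (posi posf index : Int),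
    pvRowA posi posf index row = true ↔ RowP posi posf index row := by
  induction row with
  | nil => intro posi posf index; simp [pvRowA, RowP_nil]
  | cons c rest ih =>
    intro posi posf index
    rw [RowP_cons]
    by_cases hd : index = posi ∨ index = posf
    · by_cases hc : c = "X"
      · simp [pvRowA, hd, hc, ih]
      · simp [pvRowA, hd, hc]
    · by_cases hc : c = "X"
      · simp [pvRowA, hd, hc]
      · simp [pvRowA, hd, hc, ih]

-- pointwise meaning of A's outer loop
def MatP (posi posf : Int) (mat : List (List String)) : Prop :=
  ∀ i : Nat, (h : i < mat.length) → RowP (posi + i) (posf - i) 0 mat[i]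

theorem MatP_cons (posi posf : Int) (r : List String) (rest : List (List String)) :
    MatP posi posf (r :: rest) ↔
      (RowP posi posf 0 r ∧ MatP (posi + 1) (posf - 1) rest) := by
  constructor
  · intro hp
    refine ⟨by simpa using hp 0 (by simp), ?_⟩
    intro i h
    have := hp (i + 1) (by simpa using Nat.succ_lt_succ h)
    simpa [show posi + ((i : Int) + 1) = posi + 1 + (i : Int) from by ring,
      show posf - ((i : Int) + 1) = posf - 1 - (i : Int) from by ring] using this
  · rintro ⟨h0, hr⟩ i h
    cases i with
    | zero => simpa using h0
    | succ i =>
      have := hr i (by simpa using Nat.lt_of_succ_lt_succ h)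
      simpa [show posi + 1 + (i : Int) = posi + ((i : Int) + 1) from by ring,
        show posf - 1 - (i : Int) = posf - ((i : Int) + 1) from by ring] using this

theorem pvMatA_iff (mat : List (List String)) : ∀ (posi posf : Int),
    pvMatA posi posf mat = true ↔ MatP posi posf mat := by
  induction mat with
  | nil => intro posi posf; simp [pvMatA]; intro i h; simp at h
  | cons r rest ih =>
    intro posi posf
    rw [MatP_cons]
    by_cases hr : pvRowA posi posf 0 r = true
    · simp [pvMatA, hr, ih, (pvRowA_iff r posi posf 0).1 hr]
    · simp only [pvMatA, hr, if_false, Bool.false_eq_true, false_iff]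
      rintro ⟨h1, _⟩
      exact hr ((pvRowA_iff r posi posf 0).2 h1)

-- membership characterisations for B's two sets
theorem mem_xs_iff (mat : List (List String)) (p : Int × Int) :
    (p ∈ (PySem.List.enumerate mat 0).flatMap (fun p =>
        (PySem.List.enumerate p.2 0).filterMap (fun q =>
          if q.2 = "X" then some (p.1, q.1) else none))) ↔
      ∃ (i : Nat) (hi : i < mat.length) (j : Nat) (hj : j < mat[i].length),
        mat[i][j] = "X" ∧ p = ((i : Int), (j : Int)) := by
  simp only [List.mem_flatMap, List.mem_filterMap, PySem.List.mem_enumerate_iff]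
  constructor
  · rintro ⟨q, ⟨i, hi, rfl⟩, j', ⟨j, hj, rfl⟩, hx⟩
    by_cases hc : mat[i][j] = "X"
    · simp [hc] at hx
      exact ⟨i, hi, j, hj, hc, by simpa using hx.symm⟩
    · simp [hc] at hx
  · rintro ⟨i, hi, j, hj, hx, rfl⟩
    exact ⟨((i : Int), mat[i]), ⟨i, hi, by simp⟩, ((j : Int), mat[i][j]),
      ⟨⟨j, hj, by simp⟩, by simp [hx]⟩⟩

theorem mem_diag_iff (mat : List (List String)) (m : Int) (p : Int × Int) :
    (p ∈ (PySem.List.enumerate mat 0).flatMap (fun p =>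
        ((PySem.Set.ofList [p.1, m - 1 - p.1]).filter
            (fun j => decide (0 ≤ j) && decide (j < (p.2.length : Int)))).map
          (fun j => (p.1, j)))) ↔
      ∃ (i : Nat) (hi : i < mat.length),
        (p.2 = (i : Int) ∨ p.2 = m - 1 - i) ∧ 0 ≤ p.2 ∧ p.2 < (mat[i].length : Int) ∧
          p.1 = (i : Int) := by
  simp only [List.mem_flatMap, List.mem_map, List.mem_filter, PySem.Set.mem_ofList,
    PySem.List.mem_enumerate_iff]
  constructor
  · rintro ⟨q, ⟨i, hi, rfl⟩, j, ⟨hj, hb⟩, rfl⟩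
    simp only [Bool.and_eq_true, decide_eq_true_eq] at hb
    simp only [List.mem_cons] at hj
    exact ⟨i, hi, by simpa using hj, hb.1, hb.2, by simp⟩
  · rintro ⟨i, hi, hj, h0, hb, hp1⟩
    refine ⟨((i : Int), mat[i]), ⟨i, hi, by simp⟩, p.2, ⟨?_, ?_⟩, ?_⟩
    · simp only [List.mem_cons]; simpa using hj
    · simp only [Bool.and_eq_true, decide_eq_true_eq]; exact ⟨h0, hb⟩
    · rw [← hp1]

-- the two formulations agree
theorem main_iff (r0 : List String) (rest : List (List String)) :
    pvMatA 0 ((r0.length : Int) - 1) (r0 :: rest) =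
      verificadiagonais_alt (r0 :: rest) := by
  set mat := r0 :: rest with hmat
  set m : Int := (r0.length : Int) with hm
  rw [verificadiagonais_alt]
  simp only [← hmat, ← hm]
  by_cases hA : pvMatA 0 (m - 1) mat = true
  · have hP := (pvMatA_iff mat 0 (m - 1)).1 hA
    rw [hA]
    symm
    rw [PySem.Set.equal_iff]
    rintro ⟨p1, p2⟩
    rw [PySem.Set.mem_ofList, PySem.Set.mem_ofList, mem_xs_iff, mem_diag_iff]
    constructor
    · rintro ⟨i, hi, j, hj, hx, hpp⟩
      obtain ⟨rfl, rfl⟩ : p1 = (i : Int) ∧ p2 = (j : Int) := by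
        simpa [Prod.ext_iff] using hpp
      have := (hP i hi j hj).1 hx
      refine ⟨i, hi, by simpa using this, by positivity, ?_, rfl⟩
      show ((j : Nat) : Int) < ((mat[i].length : Nat) : Int)
      exact_mod_cast hj
    · rintro ⟨i, hi, hj, h0, hb, rfl⟩
      obtain ⟨j, rfl⟩ : ∃ j : Nat, p2 = (j : Int) := ⟨p2.toNat, (Int.toNat_of_nonneg h0).symm⟩
      have hb' : ((j : Nat) : Int) < ((mat[i].length : Nat) : Int) := hb
      have hjn : j < mat[i].length := by exact_mod_cast hb' 
      have hx : mat[i][j] = "X" := (hP i hi j hjn).2 (by simpa using hj.imp id id)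
      exact ⟨i, hi, j, hjn, hx, rfl⟩
  · rw [Bool.eq_false_iff.mpr hA]
    symm
    rw [Bool.eq_false_iff]
    intro hEq
    apply hA
    rw [pvMatA_iff]
    intro i hi j hj
    have hmem := (PySem.Set.equal_iff _ _).1 hEq ((i : Int), (j : Int))
    rw [PySem.Set.mem_ofList, PySem.Set.mem_ofList, mem_xs_iff, mem_diag_iff] at hmem
    constructor
    · intro hx
      obtain ⟨i', hi', hj', _, _, hp1⟩ := hmem.1 ⟨i, hi, j, hj, hx, rfl⟩
      have : i = i' := by
        have : ((i : Int)) = (i' : Int) := hp1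
        exact_mod_cast this
      subst this
      simpa using hj'.imp (by exact fun h => by omega) (by exact fun h => by omega)
    · intro hd
      have hset : ((i : Int), (j : Int)).2 = (i : Int) ∨ ((i : Int), (j : Int)).2 = m - 1 - (i : Int) := by
        simpa using hd.imp (fun h => by omega) (fun h => by omega)
      have hbnd : ((i : Int), (j : Int)).2 < (mat[i].length : Int) := by
        show ((j : Nat) : Int) < _
        exact_mod_cast hj
      obtain ⟨i', hi', j', hj', hx, hp⟩ := hmem.2 ⟨i, hi, hset, by positivity, hbnd, rfl⟩
      obtain ⟨h1, h2⟩ : ((i : Int)) = (i' : Int) ∧ ((j : Int)) = (j' : Int) := by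
        simpa [Prod.ext_iff] using hp
      have h1 : i = i' := by exact_mod_cast h1
      have h2 : j = j' := by exact_mod_cast h2
      subst h1; subst h2; exact hx

-- ===== VERDICT (by name: the statement is the Claim_ definition above) =====
theorem verificadiagonais_spec : Claim_equal_verificadiagonais := by
  intro matriz _ hpre
  unfold Spec_verificadiagonais
  match matriz with
  | [] => exact absurd rfl hpre
  | r0 :: rest => exact main_iff r0 rest
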